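-- pv_equiv track=rewrite | github.com/Geoany/CoSMoMVPA | doc/matlab2rst.py | remove_trailing_percent
-- ===== SOURCE A (Python) =====
-- def remove_trailing_percent(data):
--     r=[]
--
--     is_percent=True
--     for d in data:
--         if not d in ' %':
--             is_percent=False
--
--         r.append(' ' if is_percent else d)
--
--     return ''.join(r)
-- ===== SOURCE B (Python) =====
-- def remove_trailing_percent(data):
--     n = 0
--     while n < len(data) and data[n] in ' %':
--         n += 1
--     return ' ' * n + data[n:]
-- ===== Notes on version B (the rewrite author's own statement) =====
-- stated objective: simpler
-- what changed: B computes the length n of the leading run of space/percent characters and returns ' '*n + data[n:] in two pieces, instead of A's per-character flag-and-append loop over the whole string.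
import Mathlib
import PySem

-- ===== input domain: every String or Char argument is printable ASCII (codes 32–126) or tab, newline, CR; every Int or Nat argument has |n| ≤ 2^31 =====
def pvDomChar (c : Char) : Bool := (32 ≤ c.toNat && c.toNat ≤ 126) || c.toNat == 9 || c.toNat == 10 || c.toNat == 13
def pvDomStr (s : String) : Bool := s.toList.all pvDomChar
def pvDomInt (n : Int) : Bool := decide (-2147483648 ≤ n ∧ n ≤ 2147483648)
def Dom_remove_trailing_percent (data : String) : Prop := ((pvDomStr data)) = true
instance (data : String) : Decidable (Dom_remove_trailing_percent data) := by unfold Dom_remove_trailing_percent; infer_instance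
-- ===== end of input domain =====

-- B replaces A's per-character flag/append loop by counting the leading run of ' '/'%'
-- and building the result as two pieces (spaces ++ tail); objective: simpler.

-- ===== PORT A =====
-- one step of A's loop: update the is_percent flag, append ' ' or the char
def pvAStep (st : Bool × List Char) (d : Char) : Bool × List Char :=
  let isP := if d = ' ' ∨ d = '%' then st.1 else false
  (isP, st.2 ++ [if isP then ' ' else d])

def remove_trailing_percent (data : String) : String :=
  String.mk (data.toList.foldl pvAStep (true, [])).2

-- ===== PORT B =====
-- length of the leading run of ' '/'%' (B's while loop)
def pvLeadRun : List Char → Nat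
  | [] => 0
  | c :: cs => if c = ' ' ∨ c = '%' then pvLeadRun cs + 1 else 0

def remove_trailing_percent_alt (data : String) : String :=
  let n := pvLeadRun data.toList
  String.mk (List.replicate n ' ' ++ data.toList.drop n)

-- ===== PRECONDITION & SPEC =====
def Spec_remove_trailing_percent (data : String) (out : String) : Prop := out = remove_trailing_percent_alt data
instance (data : String) (out : String) : Decidable (Spec_remove_trailing_percent data out) := by unfold Spec_remove_trailing_percent; infer_instance

-- ===== CLAIM (what is proved, stated in full; the proofs are below) =====
def Claim_equal_remove_trailing_percent : Prop := ∀ (data : String), Dom_remove_trailing_percent data → Spec_remove_trailing_percent data (remove_trailing_percent data)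

-- ===== LEMMAS AND PROOFS =====
theorem pv_foldl_false (l : List Char) (acc : List Char) :
    (l.foldl pvAStep (false, acc)).2 = acc ++ l := by
  induction l generalizing acc with
  | nil => simp
  | cons c cs ih =>
      by_cases h : c = ' ' ∨ c = '%' <;>
        simp [pvAStep, h, ih]

theorem pv_foldl_true (l : List Char) (acc : List Char) :
    (l.foldl pvAStep (true, acc)).2
      = acc ++ (List.replicate (pvLeadRun l) ' ' ++ l.drop (pvLeadRun l)) := by
  induction l generalizing acc with
  | nil => simp [pvLeadRun]
  | cons c cs ih =>
      by_cases h : c = ' ' ∨ c = '%'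
      · simp [pvAStep, h, pvLeadRun, ih, List.replicate_succ]
      · simp [pvAStep, h, pvLeadRun, pv_foldl_false]

-- ===== VERDICT (by name: the statement is the Claim_ definition above) =====
theorem remove_trailing_percent_spec : Claim_equal_remove_trailing_percent := by
  intro data _
  unfold Spec_remove_trailing_percent remove_trailing_percent remove_trailing_percent_alt
  simp [pv_foldl_true]
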